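-- pv_equiv track=rewrite | github.com/nic-obert/ascii-converter-web | src/compressor.py | decompose_int
-- ===== SOURCE A (Python) =====
-- from typing import Tuple
--
-- def decompose_int(number: int, span: int) -> Tuple[int]:
--     digest = [0] * span
--     for i in range(span):
--         digest[i] = number % 256
--         number //= 256
--         if number == 0:
--             break
--     return digest
-- ===== SOURCE B (Python) =====
-- def decompose_int(number, span):
--     # Reduce once modulo 256**span (handles negatives and truncation in one step),
--     # then serialize with the native fixed-width little-endian byte conversion.
--     if span <= 0:
--         return []
--     m = number % (1 << (8 * span))
--     return list(m.to_bytes(span, 'little'))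
-- ===== Notes on version B (the rewrite author's own statement) =====
-- stated objective: alternative
-- what changed: Replaces A's per-byte loop with a running quotient and early break by a single modular reduction number % 2**(8*span) followed by the native fixed-width little-endian serialization int.to_bytes; B has no loop at all.
import Mathlib
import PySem

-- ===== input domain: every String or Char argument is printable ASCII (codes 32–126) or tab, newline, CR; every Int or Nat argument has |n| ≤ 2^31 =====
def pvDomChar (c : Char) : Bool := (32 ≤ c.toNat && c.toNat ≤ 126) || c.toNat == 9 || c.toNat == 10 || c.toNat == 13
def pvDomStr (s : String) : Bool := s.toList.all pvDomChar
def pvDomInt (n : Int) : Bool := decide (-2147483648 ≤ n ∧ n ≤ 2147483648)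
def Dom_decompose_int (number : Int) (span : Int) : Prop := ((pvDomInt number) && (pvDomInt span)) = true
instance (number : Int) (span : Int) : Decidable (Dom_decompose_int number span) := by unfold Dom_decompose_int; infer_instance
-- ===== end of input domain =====

-- B replaces A's per-byte loop (running quotient, in-place writes, early break) by one
-- modular reduction number % 2**(8*span) followed by the native fixed-width little-endian
-- serialization int.to_bytes; objective: alternative.

-- ===== PORT A =====
-- A's for-loop over range(span) with mutable digest, running quotient and early break,
-- transcribed as structural recursion on the loop index i over the preallocated digest.
def decompose_int_loopA (number : Int) (i : Nat) (digest : List Int) : List Int :=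
  if h : i < digest.length then
    let digest' := digest.set i (PySem.Int.mod number 256)
    let number' := PySem.Int.floordiv number 256
    if number' = 0 then digest' else decompose_int_loopA number' (i + 1) digest'
  else digest
termination_by digest.length - i
decreasing_by simp [List.length_set]; omega

def decompose_int (number : Int) (span : Int) : List Int :=
  decompose_int_loopA number 0 (List.replicate span.toNat 0)

-- ===== PORT B =====
-- int.to_bytes(len, 'little') of a nonnegative int that fits, ported by hand as the
-- little-endian fixed-width byte serialization it computes (exact on that domain).
def pvToBytesLE (m : Int) (len : Nat) : List Int :=
  match len with
  | 0 => []
  | l + 1 => PySem.Int.mod m 256 :: pvToBytesLE (PySem.Int.floordiv m 256) l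

def decompose_int_alt (number : Int) (span : Int) : List Int :=
  if span ≤ 0 then []
  else pvToBytesLE (PySem.Int.mod number (2 ^ (8 * span).toNat)) span.toNat

-- ===== PRECONDITION & SPEC =====
def Spec_decompose_int (number : Int) (span : Int) (out : List Int) : Prop := out = decompose_int_alt number span
instance (number : Int) (span : Int) (out : List Int) : Decidable (Spec_decompose_int number span out) := by unfold Spec_decompose_int; infer_instance

-- ===== CLAIM (what is proved, stated in full; the proofs are below) =====
def Claim_equal_decompose_int : Prop := ∀ (number : Int) (span : Int), Dom_decompose_int number span → Spec_decompose_int number span (decompose_int number span)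

-- ===== LEMMAS AND PROOFS =====

-- byte j of n0, little-endian base 256
def pvByte (n0 : Int) (j : Nat) : Int := PySem.Int.mod (PySem.Int.floordiv n0 (256 ^ j)) 256

lemma fdiv_pow_succ (n0 : Int) (i : Nat) :
    PySem.Int.floordiv (PySem.Int.floordiv n0 (256 ^ i)) 256 = PySem.Int.floordiv n0 (256 ^ (i + 1)) := by
  have h1 : (0:Int) < 256 ^ i := by positivity
  have h2 : (0:Int) < 256 ^ (i+1) := by positivity
  rw [PySem.Int.floordiv_eq_ediv_of_pos h1, PySem.Int.floordiv_eq_ediv_of_pos (by norm_num : (0:Int) < 256),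
      PySem.Int.floordiv_eq_ediv_of_pos h2, Int.ediv_ediv_of_nonneg (le_of_lt h1)]
  rw [pow_succ]

lemma fdiv_pow_vanish (n0 : Int) (i j : Nat) (hij : i ≤ j)
    (h0 : PySem.Int.floordiv n0 (256 ^ i) = 0) :
    PySem.Int.floordiv n0 (256 ^ j) = 0 := by
  induction j with
  | zero =>
    have : i = 0 := by omega
    exact this ▸ h0
  | succ j ih =>
    rcases Nat.lt_or_ge i (j+1) with hlt | hge
    · have := ih (by omega)
      rw [← fdiv_pow_succ, this]
      simp [PySem.Int.floordiv]
    · have : i = j + 1 := by omega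
      exact this ▸ h0

lemma aGo_eq (n0 : Int) : ∀ (k i : Nat) (digest : List Int),
    digest.length = i + k →
    (∀ j (h : j < digest.length), i ≤ j → digest[j] = 0) →
    (∀ j (h : j < digest.length), j < i → digest[j] = pvByte n0 j) →
    decompose_int_loopA (PySem.Int.floordiv n0 (256 ^ i)) i digest
      = (List.range digest.length).map (pvByte n0) := by
  intro k
  induction k with
  | zero =>
    intro i digest hlen _ hlo
    rw [decompose_int_loopA]
    rw [dif_neg (by omega)]
    apply List.ext_getElem (by simp)
    intro j h1 h2
    simp only [List.getElem_map, List.getElem_range]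
    exact hlo j h1 (by omega)
  | succ k ih =>
    intro i digest hlen hhi hlo
    rw [decompose_int_loopA]
    have hi : i < digest.length := by omega
    rw [dif_pos hi]
    simp only
    rw [fdiv_pow_succ]
    have hset : ∀ j (h : j < (digest.set i (PySem.Int.mod (PySem.Int.floordiv n0 (256 ^ i)) 256)).length),
        j < i + 1 → (digest.set i (PySem.Int.mod (PySem.Int.floordiv n0 (256 ^ i)) 256))[j] = pvByte n0 j := by
      intro j h hj
      rcases Nat.lt_or_ge j i with hji | hji
      · rw [List.getElem_set_ne (by omega)]
        exact hlo j (by simpa using h) hji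
      · have : j = i := by omega
        subst this
        rw [List.getElem_set_self]
        rfl
    split_ifs with hz
    · -- early break: remaining bytes are 0 anyway
      apply List.ext_getElem (by simp)
      intro j h1 h2
      simp only [List.getElem_map, List.getElem_range, List.length_set] at *
      rcases Nat.lt_or_ge j (i+1) with hji | hji
      · exact hset j (by simpa using h1) hji
      · rw [List.getElem_set_ne (by omega)]
        have hb : pvByte n0 j = 0 := by
          unfold pvByte
          rw [fdiv_pow_vanish n0 (i+1) j hji hz]
          simp [PySem.Int.mod]
        rw [hb]
        exact hhi j (by simpa using h1) (by omega)
    · rw [ih (i+1) _ (by simp; omega) ?_ hset]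
      · simp
      · intro j h hj
        rw [List.getElem_set_ne (by omega)]
        exact hhi j (by simpa using h) (by omega)

-- (n % (d*e)) / d = (n / d) % e for 0 < d (Euclidean div/mod)
lemma emod_mul_ediv (n d e : Int) (hd : 0 < d) :
    (n % (d * e)) / d = (n / d) % e := by
  have hk : n / (d * e) = n / d / e := (Int.ediv_ediv_of_nonneg (le_of_lt hd)).symm
  rw [Int.emod_def, Int.emod_def, hk]
  have h1 : n - d * e * (n / d / e) = n + (-(e * (n / d / e))) * d := by ring
  rw [h1, Int.add_mul_ediv_right _ _ (ne_of_gt hd)]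
  ring

-- low half: byte i of (n mod 256^h) equals byte i of n, for i < h
lemma mod_pow_byte (n : Int) (i h : Nat) (hih : i < h) :
    pvByte (PySem.Int.mod n (256 ^ h)) i = pvByte n i := by
  unfold pvByte
  have hph : (0:Int) < 256 ^ h := by positivity
  have hpi : (0:Int) < 256 ^ i := by positivity
  rw [PySem.Int.mod_eq_emod_of_pos hph,
      PySem.Int.floordiv_eq_ediv_of_pos hpi, PySem.Int.floordiv_eq_ediv_of_pos hpi,
      PySem.Int.mod_eq_emod_of_pos (by norm_num : (0:Int) < 256),
      PySem.Int.mod_eq_emod_of_pos (by norm_num : (0:Int) < 256)]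
  have hsplit : (256:Int) ^ h = 256 ^ i * 256 ^ (h - i) := by
    rw [← pow_add]; congr 1; omega
  rw [hsplit, emod_mul_ediv _ _ _ hpi]
  exact Int.emod_emod_of_dvd _ (dvd_pow_self 256 (by omega : h - i ≠ 0))

-- byte j of (n // 256) is byte (j+1) of n
lemma byte_fdiv_succ (n : Int) (j : Nat) :
    pvByte (PySem.Int.floordiv n 256) j = pvByte n (j + 1) := by
  unfold pvByte
  have hpj : (0:Int) < 256 ^ j := by positivity
  have hpj1 : (0:Int) < 256 ^ (j + 1) := by positivity
  rw [PySem.Int.floordiv_eq_ediv_of_pos hpj, PySem.Int.floordiv_eq_ediv_of_pos (by norm_num : (0:Int) < 256),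
      PySem.Int.floordiv_eq_ediv_of_pos hpj1, Int.ediv_ediv_of_nonneg (by norm_num : (0:Int) ≤ 256)]
  rw [pow_succ']

lemma toBytesLE_eq (len : Nat) : ∀ (m : Int),
    pvToBytesLE m len = (List.range len).map (pvByte m) := by
  induction len with
  | zero => intro m; simp [pvToBytesLE]
  | succ l ih =>
    intro m
    rw [pvToBytesLE, ih, List.range_succ_eq_map]
    simp only [List.map_cons, List.map_map]
    congr 1
    · unfold pvByte
      rw [pow_zero, PySem.Int.floordiv_eq_ediv_of_pos (by norm_num : (0:Int) < 1), Int.ediv_one]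
    · apply List.map_congr_left
      intro j _
      simp only [Function.comp_apply]
      exact byte_fdiv_succ m j

-- ===== VERDICT =====
theorem decompose_int_spec : Claim_equal_decompose_int := by
  intro number span _
  unfold Spec_decompose_int decompose_int decompose_int_alt
  have h0 : number = PySem.Int.floordiv number (256 ^ 0) := by
    simp [PySem.Int.floordiv]
  nth_rewrite 1 [h0]
  rw [aGo_eq number span.toNat 0 (List.replicate span.toNat 0) (by simp)
        (by intro j h _; simp) (by intro j h hj; omega)]
  simp only [List.length_replicate]
  split_ifs with hs
  · have : span.toNat = 0 := by omega
    simp [this]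
  · rw [toBytesLE_eq]
    apply List.map_congr_left
    intro i hi
    simp only [List.mem_range] at hi
    have hpow : (2:Int) ^ (8 * span).toNat = 256 ^ span.toNat := by
      have h8 : (8 * span).toNat = 8 * span.toNat := by omega
      rw [h8, pow_mul]
      norm_num
    rw [hpow, mod_pow_byte number i span.toNat hi]
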